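-- pv_equiv track=rewrite | github.com/ud-turkic/parallel | scripts/tabulate_parallel_sentences.py | sort_sentence_ids
-- ===== SOURCE A (Python) =====
-- def sort_sentence_ids(ids):
--     """Sort sentence IDs in the specified order: cairo, udtw23, then general numbers."""
--
--     def sort_key(id_str):
--         # Handle cairo IDs
--         if id_str.startswith('cairo-'):
--             num_part = id_str[len('cairo-'):]
--             # Convert any decimal numbers properly
--             try:
--                 if '.' in num_part:
--                     main, sub = num_part.split('.')
--                     return (0, int(main), int(sub))
--                 else:
--                     return (0, int(num_part), 0)
--             except ValueError:
--                 # If conversion fails, use string comparison but keep in cairo category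
--                 return (0, 0, 0, num_part)  # Add extra tuple element for string comparisons
--
--         # Handle udtw23 IDs
--         elif id_str.startswith('udtw23-'):
--             num_part = id_str[len('udtw23-'):]
--             # Convert any decimal numbers properly
--             try:
--                 if '.' in num_part:
--                     main, sub = num_part.split('.')
--                     return (1, int(main), int(sub))
--                 else:
--                     return (1, int(num_part), 0)
--             except ValueError:
--                 # If conversion fails, use string comparison but keep in udtw23 category
--                 return (1, 0, 0, num_part)  # Add extra tuple element for string comparisons
--
--         # Handle general numeric IDs
--         else:
--             try:
--                 if '.' in id_str:
--                     main, sub = id_str.split('.')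
--                     return (2, int(main), int(sub))
--                 else:
--                     return (2, int(id_str), 0)
--             except ValueError:
--                 # If conversion fails, use string comparison in the general category
--                 return (2, 0, 0, id_str)  # Add extra tuple element for string comparisons
--
--     # Ensure all IDs are strings
--     string_ids = [str(id_val) for id_val in ids]
--     return sorted(string_ids, key=sort_key)
-- ===== SOURCE B (Python) =====
-- def sort_sentence_ids(ids):
--     """Sort sentence IDs: bucket-partition (cairo, udtw23, general) in one pass,
--     stable-sort each bucket by the numeric sub-key only, then concatenate."""
--
--     def num_key(num_part):
--         # same numeric/string sub-key as the original (category component dropped)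
--         try:
--             if '.' in num_part:
--                 main, sub = num_part.split('.')
--                 return (int(main), int(sub))
--             else:
--                 return (int(num_part), 0)
--         except ValueError:
--             return (0, 0, num_part)
--
--     cairo, udtw, general = [], [], []
--     for id_val in ids:
--         s = str(id_val)
--         if s.startswith('cairo-'):
--             cairo.append(s)
--         elif s.startswith('udtw23-'):
--             udtw.append(s)
--         else:
--             general.append(s)
--
--     cairo.sort(key=lambda s: num_key(s[len('cairo-'):]))
--     udtw.sort(key=lambda s: num_key(s[len('udtw23-'):]))
--     general.sort(key=num_key)
--     return cairo + udtw + general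
-- ===== Notes on version B (the rewrite author's own statement) =====
-- stated objective: alternative
-- what changed: Replaces the single global sorted() with a tuple key carrying a 0/1/2 category prefix by a one-pass partition of the ids into cairo/udtw23/general buckets, a stable sort of each bucket on the numeric sub-key alone, and concatenation of the three sorted buckets.
import Mathlib
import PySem

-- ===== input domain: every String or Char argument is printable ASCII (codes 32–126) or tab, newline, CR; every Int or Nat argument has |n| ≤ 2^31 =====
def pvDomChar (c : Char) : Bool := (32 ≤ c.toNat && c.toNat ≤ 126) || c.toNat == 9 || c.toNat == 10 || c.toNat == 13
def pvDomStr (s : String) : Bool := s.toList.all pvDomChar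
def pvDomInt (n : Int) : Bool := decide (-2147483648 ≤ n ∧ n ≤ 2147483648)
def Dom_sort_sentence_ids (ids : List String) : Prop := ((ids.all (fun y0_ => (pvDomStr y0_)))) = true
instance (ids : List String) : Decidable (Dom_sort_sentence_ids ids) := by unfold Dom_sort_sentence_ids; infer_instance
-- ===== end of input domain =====

-- B replaces A's single global keyed sorted() by a one-pass three-way bucket partition followed by
-- three per-bucket stable sorts on the numeric sub-key alone, concatenated (same values; objective: alternative decomposition).

-- ===== PORT A =====
-- Python's tuple sort keys are encoded order-faithfully as `List Int` (lexicographic list order =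
-- Python's tuple/shorter-is-smaller rule on the keys that actually occur):
--   numeric key (…, m, s)            ↦ … ++ [m, s]
--   ValueError fallback (…, 0, 0, np) ↦ … ++ [0, 0, 1] ++ code points of np
-- A numeric tail [m,s] agrees with Python against a fallback tail [0,0,1,…] (compare m,0 then s,0,
-- then prefix < longer, exactly Python's 3-tuple < 4-tuple rule — the marker 1 keeps a strict
-- prefix even for an empty np), and two fallbacks compare their strings by code points, as Python does.

-- `except ValueError` key of both Pythons: (0, 0, num_part) resp. (c, 0, 0, num_part)
def pvFallbackKey (np : List Char) : List Int :=
  0 :: 0 :: 1 :: np.map (fun ch => (ch.toNat : Int))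

-- the shared try/except numeric parse (identical text in A's sort_key and B's num_key)
def pvSubKey (np : List Char) : List Int :=
  if '.' ∈ np then
    match PySem.Chars.splitOn np ['.'] with
    | [main, sub] =>
      match PySem.Int.ofChars? main, PySem.Int.ofChars? sub with
      | some m, some s => [m, s]
      | _, _ => pvFallbackKey np            -- int() raised ValueError
    | _ => pvFallbackKey np                 -- unpacking to (main, sub) raised ValueError
  else
    match PySem.Int.ofChars? np with
    | some m => [m, 0]
    | none => pvFallbackKey np

def pvIsCairo (s : String) : Bool := PySem.Chars.startswith s.toList ("cairo-".toList)
def pvIsUdtw (s : String) : Bool := PySem.Chars.startswith s.toList ("udtw23-".toList)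

-- A's sort_key: category prefix 0/1/2 consed onto the numeric sub-key of the suffix
def pvSortKey (id_str : String) : List Int :=
  if pvIsCairo id_str then
    0 :: pvSubKey (PySem.List.slice id_str.toList (some 6) none)   -- id_str[len('cairo-'):]
  else if pvIsUdtw id_str then
    1 :: pvSubKey (PySem.List.slice id_str.toList (some 7) none)   -- id_str[len('udtw23-'):]
  else
    2 :: pvSubKey id_str.toList

def sort_sentence_ids (ids : List String) : List String :=
  let string_ids := ids.map (fun id_val => id_val)   -- str(id_val) on a str is the str itself
  PySem.List.sorted string_ids pvSortKey

-- ===== PORT B =====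
def pvCairoKey (s : String) : List Int := pvSubKey (PySem.List.slice s.toList (some 6) none)
def pvUdtwKey (s : String) : List Int := pvSubKey (PySem.List.slice s.toList (some 7) none)
def pvGeneralKey (s : String) : List Int := pvSubKey s.toList

def sort_sentence_ids_alt (ids : List String) : List String :=
  let bs := ids.foldl
    (fun acc s =>
      if pvIsCairo s then (acc.1 ++ [s], acc.2.1, acc.2.2)
      else if pvIsUdtw s then (acc.1, acc.2.1 ++ [s], acc.2.2)
      else (acc.1, acc.2.1, acc.2.2 ++ [s]))
    (([], [], []) : List String × List String × List String)
  PySem.List.sorted bs.1 pvCairoKey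
    ++ PySem.List.sorted bs.2.1 pvUdtwKey
    ++ PySem.List.sorted bs.2.2 pvGeneralKey

-- ===== PRECONDITION & SPEC =====
def Spec_sort_sentence_ids (ids : List String) (out : List String) : Prop := out = sort_sentence_ids_alt ids
instance (ids : List String) (out : List String) : Decidable (Spec_sort_sentence_ids ids out) := by unfold Spec_sort_sentence_ids; infer_instance

-- ===== CLAIM (what is proved, stated in full; the proofs are below) =====
def Claim_equal_sort_sentence_ids : Prop := ∀ (ids : List String), Dom_sort_sentence_ids ids → Spec_sort_sentence_ids ids (sort_sentence_ids ids)

-- ===== LEMMAS AND PROOFS =====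

-- the numeric category A's key starts with
def pvCat (s : String) : Int := if pvIsCairo s then 0 else if pvIsUdtw s then 1 else 2

def pvTailKey (s : String) : List Int :=
  if pvIsCairo s then pvCairoKey s else if pvIsUdtw s then pvUdtwKey s else pvGeneralKey s

lemma pvSortKey_eq (s : String) : pvSortKey s = pvCat s :: pvTailKey s := by
  unfold pvSortKey pvCat pvTailKey pvCairoKey pvUdtwKey pvGeneralKey
  split_ifs <;> rfl

lemma pvBefore_true_of_cat_lt (x y : String) (h : pvCat x < pvCat y) :
    decide (pvSortKey x < pvSortKey y) = true := by
  rw [pvSortKey_eq x, pvSortKey_eq y]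
  simp only [decide_eq_true_eq, List.cons_lt_cons_iff]
  exact Or.inl h

lemma pvBefore_false_of_cat_lt (x y : String) (h : pvCat y < pvCat x) :
    decide (pvSortKey x < pvSortKey y) = false := by
  rw [pvSortKey_eq x, pvSortKey_eq y]
  simp only [decide_eq_false_iff_not, List.cons_lt_cons_iff]
  rintro (hlt | ⟨heq, -⟩) <;> omega

lemma pvBefore_eq_of_cat_eq (x y : String) (h : pvCat x = pvCat y) :
    decide (pvSortKey x < pvSortKey y) = decide (pvTailKey x < pvTailKey y) := by
  rw [pvSortKey_eq x, pvSortKey_eq y, h]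
  simp

lemma pvInsertBy_append_of_true {α : Type} (before : α → α → Bool) (x : α) (ys zs : List α)
    (h : ∀ z ∈ zs, before x z = true) :
    PySem.List.insertBy before x (ys ++ zs) = PySem.List.insertBy before x ys ++ zs := by
  induction ys with
  | nil =>
    cases zs with
    | nil => simp [PySem.List.insertBy]
    | cons z zs' => simp [PySem.List.insertBy, h z (by simp)]
  | cons y ys ih =>
    by_cases hy : before x y <;> simp [PySem.List.insertBy, hy, ih]

lemma pvInsertBy_append_of_false {α : Type} (before : α → α → Bool) (x : α) (ys zs : List α)
    (h : ∀ y ∈ ys, before x y = false) :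
    PySem.List.insertBy before x (ys ++ zs) = ys ++ PySem.List.insertBy before x zs := by
  induction ys with
  | nil => simp
  | cons y ys ih =>
    have hy := h y (by simp)
    simp only [List.cons_append, PySem.List.insertBy, hy, Bool.false_eq_true, if_false,
      List.cons.injEq, true_and]
    exact ih (fun y hy => h y (by simp [hy]))

lemma pvInsertBy_congr {α : Type} (b1 b2 : α → α → Bool) (x : α) (ys : List α)
    (h : ∀ y ∈ ys, b1 x y = b2 x y) :
    PySem.List.insertBy b1 x ys = PySem.List.insertBy b2 x ys := by
  induction ys with
  | nil => rfl
  | cons y ys ih =>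
    have hy := h y (by simp)
    by_cases hb : b2 x y
    · simp [PySem.List.insertBy, hy, hb]
    · simp [PySem.List.insertBy, hy, hb]
      exact ih (fun y hy => h y (by simp [hy]))

lemma pvFoldl_insertBy_congr {α : Type} (b1 b2 : α → α → Bool) (P : α → Prop)
    (l acc : List α) (hl : ∀ x ∈ l, P x) (hacc : ∀ y ∈ acc, P y)
    (hb : ∀ a b, P a → P b → b1 a b = b2 a b) :
    l.foldl (fun acc x => PySem.List.insertBy b1 x acc) acc
      = l.foldl (fun acc x => PySem.List.insertBy b2 x acc) acc := by
  induction l generalizing acc with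
  | nil => rfl
  | cons x l ih =>
    have hx : P x := hl x (by simp)
    simp only [List.foldl_cons]
    rw [pvInsertBy_congr b1 b2 x acc (fun y hy => hb x y hx (hacc y hy))]
    exact ih (PySem.List.insertBy b2 x acc) (fun z hz => hl z (by simp [hz]))
      (fun y hy => ((PySem.List.mem_insertBy b2 x y acc).mp hy).elim
        (fun h => h ▸ hx) (hacc y))

-- B's partition loop produces the three filters
lemma pvBuckets_eq (l : List String) (a b c : List String) :
    l.foldl
      (fun acc s =>
        if pvIsCairo s then (acc.1 ++ [s], acc.2.1, acc.2.2)
        else if pvIsUdtw s then (acc.1, acc.2.1 ++ [s], acc.2.2)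
        else (acc.1, acc.2.1, acc.2.2 ++ [s])) (a, b, c)
      = (a ++ l.filter pvIsCairo,
         b ++ l.filter (fun s => !pvIsCairo s && pvIsUdtw s),
         c ++ l.filter (fun s => !pvIsCairo s && !pvIsUdtw s)) := by
  induction l generalizing a b c with
  | nil => simp
  | cons x l ih =>
    by_cases hc : pvIsCairo x
    · simp [hc, ih]
    · by_cases hu : pvIsUdtw x <;> simp [hc, hu, ih]

-- the insertion-sort fold over A's key splits along the three categories
lemma pvSplit_foldl (l A0 A1 A2 : List String)
    (h0 : ∀ y ∈ A0, pvIsCairo y = true)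
    (h1 : ∀ y ∈ A1, pvIsCairo y = false ∧ pvIsUdtw y = true)
    (h2 : ∀ y ∈ A2, pvIsCairo y = false ∧ pvIsUdtw y = false) :
    l.foldl (fun acc x => PySem.List.insertBy (fun a b => decide (pvSortKey a < pvSortKey b)) x acc)
        (A0 ++ (A1 ++ A2))
      = (l.filter pvIsCairo).foldl
          (fun acc x => PySem.List.insertBy (fun a b => decide (pvSortKey a < pvSortKey b)) x acc) A0
        ++ ((l.filter (fun s => !pvIsCairo s && pvIsUdtw s)).foldl
          (fun acc x => PySem.List.insertBy (fun a b => decide (pvSortKey a < pvSortKey b)) x acc) A1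
        ++ (l.filter (fun s => !pvIsCairo s && !pvIsUdtw s)).foldl
          (fun acc x => PySem.List.insertBy (fun a b => decide (pvSortKey a < pvSortKey b)) x acc) A2) := by
  induction l generalizing A0 A1 A2 with
  | nil => rfl
  | cons x l ih =>
    have cat0 : ∀ y, pvIsCairo y = true → pvCat y = 0 := by
      intro y hy; simp [pvCat, hy]
    have cat1 : ∀ y, pvIsCairo y = false → pvIsUdtw y = true → pvCat y = 1 := by
      intro y hy hu; simp [pvCat, hy, hu]
    have cat2 : ∀ y, pvIsCairo y = false → pvIsUdtw y = false → pvCat y = 2 := by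
      intro y hy hu; simp [pvCat, hy, hu]
    by_cases hc : pvIsCairo x
    · -- x goes into the cairo bucket
      simp only [List.foldl_cons, List.filter_cons, hc, Bool.not_true, Bool.false_and, if_pos,
        Bool.false_eq_true, if_false]
      rw [pvInsertBy_append_of_true _ x A0 (A1 ++ A2) (by
        intro z hz
        apply pvBefore_true_of_cat_lt
        rw [cat0 x hc]
        rcases List.mem_append.mp hz with hz | hz
        · rw [cat1 z (h1 z hz).1 (h1 z hz).2]; omega
        · rw [cat2 z (h2 z hz).1 (h2 z hz).2]; omega)]
      exact ih (PySem.List.insertBy _ x A0) A1 A2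
        (fun y hy => ((PySem.List.mem_insertBy _ x y A0).mp hy).elim (fun h => h ▸ hc) (h0 y))
        h1 h2
    · rw [Bool.not_eq_true] at hc
      by_cases hu : pvIsUdtw x
      · -- x goes into the udtw23 bucket
        simp only [List.foldl_cons, List.filter_cons, hc, hu, Bool.not_false,
          Bool.true_and, Bool.false_eq_true, if_false, if_pos]
        rw [pvInsertBy_append_of_false _ x A0 (A1 ++ A2) (by
          intro y hy
          apply pvBefore_false_of_cat_lt
          rw [cat1 x hc hu, cat0 y (h0 y hy)]; omega)]
        rw [pvInsertBy_append_of_true _ x A1 A2 (by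
          intro z hz
          apply pvBefore_true_of_cat_lt
          rw [cat1 x hc hu, cat2 z (h2 z hz).1 (h2 z hz).2]; omega)]
        exact ih A0 (PySem.List.insertBy _ x A1) A2
          h0
          (fun y hy => ((PySem.List.mem_insertBy _ x y A1).mp hy).elim
            (fun h => h ▸ ⟨hc, hu⟩) (h1 y))
          h2
      · -- x goes into the general bucket
        rw [Bool.not_eq_true] at hu
        simp only [List.foldl_cons, List.filter_cons, hc, hu, Bool.not_false,
          Bool.true_and, Bool.false_eq_true, if_false, if_pos]
        rw [pvInsertBy_append_of_false _ x A0 (A1 ++ A2) (by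
          intro y hy
          apply pvBefore_false_of_cat_lt
          rw [cat2 x hc hu, cat0 y (h0 y hy)]; omega)]
        rw [pvInsertBy_append_of_false _ x A1 A2 (by
          intro y hy
          apply pvBefore_false_of_cat_lt
          rw [cat2 x hc hu, cat1 y (h1 y hy).1 (h1 y hy).2]; omega)]
        exact ih A0 A1 (PySem.List.insertBy _ x A2)
          h0 h1
          (fun y hy => ((PySem.List.mem_insertBy _ x y A2).mp hy).elim
            (fun h => h ▸ ⟨hc, hu⟩) (h2 y))

-- within one bucket, sorting by A's full key is sorting by the bucket's sub-key
lemma pvBucket_sorted0 (l : List String) :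
    PySem.List.sorted (l.filter pvIsCairo) pvSortKey
      = PySem.List.sorted (l.filter pvIsCairo) pvCairoKey := by
  rw [PySem.List.sorted_eq_foldl_insertBy, PySem.List.sorted_eq_foldl_insertBy]
  apply pvFoldl_insertBy_congr _ _ (fun s => pvIsCairo s = true)
  · intro x hx; exact (List.mem_filter.mp hx).2
  · intro y hy; simp at hy
  · intro a b ha hb
    rw [pvBefore_eq_of_cat_eq a b (by simp [pvCat, ha, hb])]
    simp [pvTailKey, ha, hb]

lemma pvBucket_sorted1 (l : List String) :
    PySem.List.sorted (l.filter (fun s => !pvIsCairo s && pvIsUdtw s)) pvSortKey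
      = PySem.List.sorted (l.filter (fun s => !pvIsCairo s && pvIsUdtw s)) pvUdtwKey := by
  rw [PySem.List.sorted_eq_foldl_insertBy, PySem.List.sorted_eq_foldl_insertBy]
  apply pvFoldl_insertBy_congr _ _ (fun s => pvIsCairo s = false ∧ pvIsUdtw s = true)
  · intro x hx
    have := (List.mem_filter.mp hx).2
    simp only [Bool.and_eq_true, Bool.not_eq_true'] at this
    exact this
  · intro y hy; simp at hy
  · intro a b ha hb
    rw [pvBefore_eq_of_cat_eq a b (by simp [pvCat, ha.1, ha.2, hb.1, hb.2])]
    simp [pvTailKey, ha.1, ha.2, hb.1, hb.2]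

lemma pvBucket_sorted2 (l : List String) :
    PySem.List.sorted (l.filter (fun s => !pvIsCairo s && !pvIsUdtw s)) pvSortKey
      = PySem.List.sorted (l.filter (fun s => !pvIsCairo s && !pvIsUdtw s)) pvGeneralKey := by
  rw [PySem.List.sorted_eq_foldl_insertBy, PySem.List.sorted_eq_foldl_insertBy]
  apply pvFoldl_insertBy_congr _ _ (fun s => pvIsCairo s = false ∧ pvIsUdtw s = false)
  · intro x hx
    have := (List.mem_filter.mp hx).2
    simp only [Bool.and_eq_true, Bool.not_eq_true'] at this
    exact this
  · intro y hy; simp at hy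
  · intro a b ha hb
    rw [pvBefore_eq_of_cat_eq a b (by simp [pvCat, ha.1, ha.2, hb.1, hb.2])]
    simp [pvTailKey, ha.1, ha.2, hb.1, hb.2]

-- ===== VERDICT (by name: the statement is the Claim_ definition above) =====
theorem sort_sentence_ids_spec : Claim_equal_sort_sentence_ids := by
  intro ids _
  unfold Spec_sort_sentence_ids sort_sentence_ids sort_sentence_ids_alt
  simp only [List.map_id_fun', id]
  rw [pvBuckets_eq ids [] [] []]
  simp only [List.nil_append]
  rw [PySem.List.sorted_eq_foldl_insertBy ids pvSortKey]
  have := pvSplit_foldl ids [] [] []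
    (by intro y hy; simp at hy) (by intro y hy; simp at hy) (by intro y hy; simp at hy)
  simp only [List.append_nil] at this
  rw [this]
  rw [← PySem.List.sorted_eq_foldl_insertBy (ids.filter pvIsCairo) pvSortKey,
      ← PySem.List.sorted_eq_foldl_insertBy (ids.filter (fun s => !pvIsCairo s && pvIsUdtw s)) pvSortKey,
      ← PySem.List.sorted_eq_foldl_insertBy (ids.filter (fun s => !pvIsCairo s && !pvIsUdtw s)) pvSortKey]
  rw [pvBucket_sorted0, pvBucket_sorted1, pvBucket_sorted2]
  simp [List.append_assoc]
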